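-- pv_equiv track=rewrite | github.com/manuboojuk/python-proxy-server | proxy.py | get_url_and_path
-- ===== SOURCE A (Python) =====
-- def get_url_and_path(get_req: str) -> tuple:
-- 	"""
-- 	Get the url of the webserver from which the object is being requested and
-- 	get the path of the object on the webserver.
--
-- 	:param get_req: The get request from which we want the url and path
-- 	:return: tuple containing the url and path for the object being requested
-- 	"""
--
-- 	# get the url of webserver from the method line of the request
-- 	url = ""
-- 	index = 5
-- 	while index < len(get_req) and get_req[index] != '/':
-- 		url += str(get_req[index])
-- 		index += 1
--
-- 	# get path that gives the location of the requested object on the webserver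
-- 	path = ""
-- 	index += 1
-- 	while index < len(get_req) and get_req[index] != ' ':
-- 		path += str(get_req[index])
-- 		index += 1
--
-- 	return url, path
-- ===== SOURCE B (Python) =====
-- def get_url_and_path(get_req: str) -> tuple:
--     """Find the two delimiters with str.find and slice, instead of building
--     the url and path character by character in two while-loops."""
--     slash = get_req.find('/', 5)
--     if slash == -1:
--         return get_req[5:], ''
--     space = get_req.find(' ', slash + 1)
--     url = get_req[5:slash]
--     path = get_req[slash + 1:] if space == -1 else get_req[slash + 1:space]
--     return url, path
-- ===== Notes on version B (the rewrite author's own statement) =====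
-- stated objective: simpler
-- what changed: Replaces the two index-driven while-loops that build url and path character by character with two str.find calls for the delimiters ('/' after position 5, then ' ') and three slices.
import Mathlib
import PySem

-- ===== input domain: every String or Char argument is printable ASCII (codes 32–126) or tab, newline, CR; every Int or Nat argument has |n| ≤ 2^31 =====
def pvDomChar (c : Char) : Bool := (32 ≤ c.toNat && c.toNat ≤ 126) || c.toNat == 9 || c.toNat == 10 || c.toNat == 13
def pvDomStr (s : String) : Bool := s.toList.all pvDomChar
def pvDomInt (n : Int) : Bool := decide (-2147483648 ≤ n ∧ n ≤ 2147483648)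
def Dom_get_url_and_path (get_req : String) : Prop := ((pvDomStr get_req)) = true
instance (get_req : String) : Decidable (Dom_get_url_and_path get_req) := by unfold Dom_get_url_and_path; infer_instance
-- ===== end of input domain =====

-- B replaces A's two character-accumulating while-loops by two delimiter searches (find) and slices; equivalence is total.

-- ===== PORT A =====
-- first while-loop: collect characters until '/' (returns the collected url chars and the chars after the '/')
def pvUrlLoop : List Char → List Char → List Char × List Char
  | acc, [] => (acc, [])
  | acc, c :: cs => if c = '/' then (acc, cs) else pvUrlLoop (acc ++ [c]) cs

-- second while-loop: collect characters until ' '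
def pvPathLoop : List Char → List Char → List Char
  | acc, [] => acc
  | acc, c :: cs => if c = ' ' then acc else pvPathLoop (acc ++ [c]) cs

def get_url_and_path (get_req : String) : String × String :=
  let p := pvUrlLoop [] (get_req.toList.drop 5)   -- index starts at 5
  (String.ofList p.1, String.ofList (pvPathLoop [] p.2))

-- ===== PORT B =====
def get_url_and_path_alt (get_req : String) : String × String :=
  let slash := PySem.Str.findFrom get_req "/" 5
  if slash = -1 then
    (PySem.Str.slice get_req (some 5) none, "")
  else
    let space := PySem.Str.findFrom get_req " " (slash + 1)
    let url := PySem.Str.slice get_req (some 5) (some slash)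
    let path := if space = -1 then PySem.Str.slice get_req (some (slash + 1)) none
                else PySem.Str.slice get_req (some (slash + 1)) (some space)
    (url, path)

-- ===== PRECONDITION & SPEC =====
def Spec_get_url_and_path (get_req : String) (out : String × String) : Prop := out = get_url_and_path_alt get_req
instance (get_req : String) (out : String × String) : Decidable (Spec_get_url_and_path get_req out) := by unfold Spec_get_url_and_path; infer_instance

-- ===== CLAIM (what is proved, stated in full; the proofs are below) =====
def Claim_equal_get_url_and_path : Prop := ∀ (get_req : String), Dom_get_url_and_path get_req → Spec_get_url_and_path get_req (get_url_and_path get_req)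

-- ===== LEMMAS AND PROOFS =====

-- A's first loop is takeWhile/after-the-delimiter
theorem pvUrlLoop_eq (t acc : List Char) :
    pvUrlLoop acc t = (acc ++ t.takeWhile (fun x => !(x == '/')), (t.dropWhile (fun x => !(x == '/'))).drop 1) := by
  induction t generalizing acc with
  | nil => simp [pvUrlLoop]
  | cons c cs ih =>
    by_cases h : c = '/'
    · subst h; simp [pvUrlLoop]
    · simp [pvUrlLoop, h, ih]

-- A's second loop is takeWhile
theorem pvPathLoop_eq (t acc : List Char) :
    pvPathLoop acc t = acc ++ t.takeWhile (fun x => !(x == ' ')) := by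
  induction t generalizing acc with
  | nil => simp [pvPathLoop]
  | cons c cs ih =>
    by_cases h : c = ' '
    · subst h; simp [pvPathLoop]
    · simp [pvPathLoop, h, ih]

theorem takeWhile_eq_self_of_not_mem (c : Char) (t : List Char) (h : c ∉ t) :
    t.takeWhile (fun x => !(x == c)) = t := by
  induction t with
  | nil => rfl
  | cons a t' ih =>
    have ha : a ≠ c := by intro e; exact h (by simp [e])
    simp only [List.takeWhile_cons]
    simp [ha, ih (by intro m; exact h (by simp [m]))]

theorem length_takeWhile_of_find (c : Char) (t : List Char) (j : Nat)
    (h1 : [c] <+: t.drop j) (h2 : ∀ i, i < j → ¬ [c] <+: t.drop i) :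
    (t.takeWhile (fun x => !(x == c))).length = j := by
  induction t generalizing j with
  | nil =>
    exfalso
    simp only [List.drop_nil] at h1
    exact by simpa using List.prefix_nil.mp h1
  | cons a t' ih =>
    cases j with
    | zero =>
      simp only [List.drop_zero] at h1
      have : a = c := ((List.cons_prefix_cons).mp h1).1.symm
      simp [this]
    | succ j' =>
      have ha : a ≠ c := by
        intro e
        exact h2 0 (Nat.succ_pos _) (by simp [e])
      simp only [List.drop_succ_cons] at h1
      have ih' := ih j' h1 (fun i hi => by
        have := h2 (i+1) (Nat.succ_lt_succ hi)
        simpa using this)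
      simp [ha, ih']

-- single-character find, expressed through takeWhile
theorem find_single_char (c : Char) (t : List Char) :
    PySem.Chars.find t [c] =
      if c ∈ t then ((t.takeWhile (fun x => !(x == c))).length : Int) else -1 := by
  by_cases hc : c ∈ t
  · simp only [hc, if_true]
    have hinf : [c] <:+: t := by
      obtain ⟨s, u, rfl⟩ := List.append_of_mem hc
      exact ⟨s, u, by simp⟩
    have hnn : 0 ≤ PySem.Chars.find t [c] := (PySem.Chars.find_nonneg_iff t [c]).mpr hinf
    obtain ⟨h1, h2⟩ := PySem.Chars.find_spec hnn
    have := length_takeWhile_of_find c t (PySem.Chars.find t [c]).toNat h1 h2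
    omega
  · simp only [hc, if_false]
    refine (PySem.Chars.find_eq_neg_one_iff t [c]).mpr ?_
    intro hinf
    exact hc (List.singleton_sublist.mp hinf.sublist)

-- dropWhile is drop of the takeWhile length
theorem dropWhile_eq_drop_len (c : Char) (t : List Char) :
    t.dropWhile (fun x => !(x == c)) = t.drop (t.takeWhile (fun x => !(x == c))).length := by
  nth_rewrite 3 [← List.takeWhile_append_dropWhile (p := fun x => !(x == c)) (l := t)]
  rw [List.drop_left]

-- take of the takeWhile length is takeWhile
theorem take_len_takeWhile (c : Char) (t : List Char) :
    t.take (t.takeWhile (fun x => !(x == c))).length = t.takeWhile (fun x => !(x == c)) := by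
  nth_rewrite 2 [← List.takeWhile_append_dropWhile (p := fun x => !(x == c)) (l := t)]
  rw [List.take_left]

-- findFrom with a start past the end of the string is -1
theorem findFrom_of_short (s sub : List Char) (h : s.length < 5) :
    PySem.Chars.findFrom s sub 5 = -1 := by
  simp only [PySem.Chars.findFrom]
  have : (s.length : Int) < 5 := by exact_mod_cast h
  simp [this]

theorem takeWhile_length_lt (c : Char) (t : List Char) (h : c ∈ t) :
    (t.takeWhile (fun x => !(x == c))).length < t.length := by
  induction t with
  | nil => cases h
  | cons a t' ih =>
    by_cases ha : a = c
    · simp [ha]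
    · rcases List.mem_cons.mp h with h' | h'
      · exact absurd h'.symm ha
      · simp only [List.takeWhile_cons]
        simp only [show (!(a == c)) = true by simp [ha]]
        simpa using ih h'

theorem str_toList_inj {x y : String} (h : x.toList = y.toList) : x = y := by
  exact String.toList_inj.mp h

theorem get_url_and_path_eq (s : String) : get_url_and_path s = get_url_and_path_alt s := by
  have hslash : ("/" : String).toList = ['/'] := rfl
  have hspace : (" " : String).toList = [' '] := rfl
  have hcast1 : (((5:Nat)):Int) = (5:Int) := rfl
  by_cases hlen : s.toList.length < 5
  · -- request shorter than 5 characters: both return ("", "")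
    have ht : s.toList.drop 5 = [] := List.drop_eq_nil_of_le (by omega)
    have hff : PySem.Chars.findFrom s.toList ['/'] 5 = -1 := findFrom_of_short _ _ hlen
    simp only [get_url_and_path, get_url_and_path_alt, PySem.Str.findFrom_eq, hslash, ht,
      pvUrlLoop_eq, pvPathLoop_eq, hff, List.takeWhile_nil, List.dropWhile_nil,
      List.drop_nil, List.append_nil, reduceIte]
    refine Prod.ext_iff.mpr ⟨str_toList_inj ?_, str_toList_inj ?_⟩
    · simp [PySem.Str.toList_slice, PySem.Chars.slice_eq_listSlice,
        PySem.List.slice_from (xs := s.toList) (a := (5:Int)) (by omega), ht]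
    · simp
  · have hlen' : 5 ≤ s.toList.length := by omega
    have hA := PySem.Chars.findFrom_natCast s.toList ['/'] 5 hlen'
    rw [find_single_char] at hA
    rw [hcast1] at hA
    by_cases hc : '/' ∈ s.toList.drop 5
    · -- a '/' is found
      set t := s.toList.drop 5 with htdef
      set j := (t.takeWhile (fun x => !(x == '/'))).length with hjdef
      have hjlt : j < t.length := takeWhile_length_lt '/' t hc
      have htlen : t.length = s.toList.length - 5 := by rw [htdef]; simp
      have hAj : PySem.Chars.findFrom s.toList ['/'] (5:Int) = 5 + (j:Int) := by
        rw [hA]; simp only [hc, if_true]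
        rw [if_neg (by omega : ¬ ((j:Int) = -1))]
      have hB := PySem.Chars.findFrom_natCast s.toList [' '] (6+j) (by omega)
      rw [find_single_char] at hB
      have hu : s.toList.drop (6+j) = t.drop (j+1) := by
        rw [htdef, List.drop_drop]; ring_nf
      have hrest : (t.dropWhile (fun x => !(x == '/'))).drop 1 = t.drop (j+1) := by
        rw [dropWhile_eq_drop_len, ← hjdef, List.drop_drop]
      set u := t.drop (j+1) with hudef
      have hcast2 : ((5:Int) + (j:Int) + 1) = (((6+j : Nat)):Int) := by push_cast; ring
      have h5t : ((5:Int)).toNat = 5 := rfl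
      by_cases hsp : ' ' ∈ u
      · set k := (u.takeWhile (fun x => !(x == ' '))).length with hkdef
        have hBk : PySem.Chars.findFrom s.toList [' '] (((6+j:Nat)):Int) = (((6+j:Nat)):Int) + (k:Int) := by
          rw [hB, hu]
          simp only [hsp, if_true]
          rw [if_neg (by omega : ¬ ((k:Int) = -1))]
        simp only [get_url_and_path, get_url_and_path_alt, PySem.Str.findFrom_eq, hslash, hspace,
          ← htdef, pvUrlLoop_eq, pvPathLoop_eq, hrest, List.nil_append, hAj]
        rw [if_neg (by omega : ¬ ((5:Int) + (j:Int) = -1)), hcast2, hBk,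
          if_neg (by omega : ¬ ((((6+j:Nat)):Int) + (k:Int) = -1))]
        refine Prod.ext_iff.mpr ⟨str_toList_inj ?_, str_toList_inj ?_⟩
        · simp only [String.toList_ofList, PySem.Str.toList_slice, PySem.Chars.slice_eq_listSlice]
          rw [PySem.List.slice_toNat _ (by omega) (by omega)]
          have h1 : ((5:Int) + (j:Int)).toNat - ((5:Int)).toNat = j := by omega
          rw [h1, h5t, ← htdef]
          exact (take_len_takeWhile '/' t).symm
        · simp only [String.toList_ofList, PySem.Str.toList_slice, PySem.Chars.slice_eq_listSlice]
          rw [PySem.List.slice_toNat _ (by omega) (by omega)]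
          have h1 : ((((6+j:Nat)):Int) + (k:Int)).toNat - ((((6+j:Nat)):Int)).toNat = k := by omega
          have h2 : ((((6+j:Nat)):Int)).toNat = 6+j := by omega
          rw [h1, h2, hu]
          exact (take_len_takeWhile ' ' u).symm
      · have hBn : PySem.Chars.findFrom s.toList [' '] (((6+j:Nat)):Int) = -1 := by
          rw [hB, hu]; simp [hsp]
        simp only [get_url_and_path, get_url_and_path_alt, PySem.Str.findFrom_eq, hslash, hspace,
          ← htdef, pvUrlLoop_eq, pvPathLoop_eq, hrest, List.nil_append, hAj]
        rw [if_neg (by omega : ¬ ((5:Int) + (j:Int) = -1)), hcast2, hBn]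
        rw [if_pos (rfl : (-1:Int) = -1)]
        refine Prod.ext_iff.mpr ⟨str_toList_inj ?_, str_toList_inj ?_⟩
        · simp only [String.toList_ofList, PySem.Str.toList_slice, PySem.Chars.slice_eq_listSlice]
          rw [PySem.List.slice_toNat _ (by omega) (by omega)]
          have h1 : ((5:Int) + (j:Int)).toNat - ((5:Int)).toNat = j := by omega
          rw [h1, h5t, ← htdef]
          exact (take_len_takeWhile '/' t).symm
        · simp only [String.toList_ofList, PySem.Str.toList_slice, PySem.Chars.slice_eq_listSlice]
          rw [PySem.List.slice_from _ (by omega)]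
          have h2 : ((((6+j:Nat)):Int)).toNat = 6+j := by omega
          rw [h2, hu]
          exact takeWhile_eq_self_of_not_mem ' ' u hsp
    · -- no '/': url is the rest of the request, path is empty
      have hAn : PySem.Chars.findFrom s.toList ['/'] (5:Int) = -1 := by
        rw [hA]; simp [hc]
      have htw : (s.toList.drop 5).takeWhile (fun x => !(x == '/')) = s.toList.drop 5 :=
        takeWhile_eq_self_of_not_mem '/' _ hc
      have hdw : ((s.toList.drop 5).dropWhile (fun x => !(x == '/'))).drop 1 = [] := by
        rw [dropWhile_eq_drop_len, htw, List.drop_drop]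
        exact List.drop_eq_nil_of_le (by simp)
      simp only [get_url_and_path, get_url_and_path_alt, PySem.Str.findFrom_eq, hslash,
        pvUrlLoop_eq, pvPathLoop_eq, hAn, hdw, htw, List.nil_append,
        List.takeWhile_nil, reduceIte]
      refine Prod.ext_iff.mpr ⟨str_toList_inj ?_, str_toList_inj ?_⟩
      · simp only [String.toList_ofList, PySem.Str.toList_slice, PySem.Chars.slice_eq_listSlice]
        rw [PySem.List.slice_from _ (by omega)]
        rfl
      · simp

-- ===== VERDICT (by name: the statement is the Claim_ definition above) =====
theorem get_url_and_path_spec : Claim_equal_get_url_and_path := by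
  intro s _
  unfold Spec_get_url_and_path
  exact get_url_and_path_eq s
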